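-- pv_equiv track=rewrite | github.com/EagleDab/Claud | scraper/parsers/mk4s.py | _build_variant_combinations
-- ===== SOURCE A (Python) =====
-- from itertools import product as iter_product
-- from typing import Any, Dict, List, Optional, Tuple
--
-- def _build_variant_combinations(blocks: List[Tuple[str, List[str]]]) -> List[Dict[str, str]]:
--     if not blocks:
--         return []
--     names = [name for name, _ in blocks]
--     variant_lists = [values for _, values in blocks]
--     combos: List[Dict[str, str]] = []
--     for combo in iter_product(*variant_lists):
--         combos.append(dict(zip(names, combo)))
--     return combos
-- ===== SOURCE B (Python) =====
-- def _build_variant_combinations(blocks):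
--     if not blocks:
--         return []
--     result = [{}]
--     for name, values in blocks:
--         result = [{**d, name: v} for d in result for v in values]
--     return result
-- ===== Notes on version B (the rewrite author's own statement) =====
-- stated objective: simpler
-- what changed: Replaces itertools.product over separated name/value lists plus dict(zip(...)) per combo with a single incremental fold over the blocks that extends a growing list of partial dicts one key at a time.
import Mathlib
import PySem

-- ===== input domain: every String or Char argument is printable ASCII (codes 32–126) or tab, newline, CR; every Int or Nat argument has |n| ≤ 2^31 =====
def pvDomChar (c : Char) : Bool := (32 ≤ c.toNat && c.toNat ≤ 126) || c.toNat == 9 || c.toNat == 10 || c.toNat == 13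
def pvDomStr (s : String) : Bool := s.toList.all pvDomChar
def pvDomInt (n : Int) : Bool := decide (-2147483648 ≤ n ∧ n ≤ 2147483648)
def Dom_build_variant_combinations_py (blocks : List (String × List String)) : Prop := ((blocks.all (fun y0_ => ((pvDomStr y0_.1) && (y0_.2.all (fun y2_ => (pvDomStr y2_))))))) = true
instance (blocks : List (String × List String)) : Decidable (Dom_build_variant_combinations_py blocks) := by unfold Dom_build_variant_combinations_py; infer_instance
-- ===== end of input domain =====

-- B replaces itertools.product + dict(zip(...)) with an incremental fold extending
-- partial dicts one block at a time (objective: simpler decomposition, same cost).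

-- ===== PORT A =====
-- itertools.product(*lists): first iterable varies slowest
def pvProduct : List (List String) → List (List String)
  | [] => [[]]
  | l :: ls => l.flatMap (fun v => (pvProduct ls).map (fun c => v :: c))

def build_variant_combinations_py (blocks : List (String × List String)) : List (List (String × String)) :=
  if blocks = [] then []
  else
    let names := blocks.map (fun b => b.1)
    let variant_lists := blocks.map (fun b => b.2)
    -- for combo in product(*variant_lists): combos.append(dict(zip(names, combo)))
    (pvProduct variant_lists).foldl
      (fun combos combo => combos ++ [(PySem.Dict.ofList (names.zip combo)).items]) []

-- ===== PORT B =====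
def build_variant_combinations_py_alt (blocks : List (String × List String)) : List (List (String × String)) :=
  if blocks = [] then []
  else
    -- result = [{}]; for name, values in blocks: result = [{**d, name: v} for d in result for v in values]
    (blocks.foldl
      (fun result b => result.flatMap (fun d => b.2.map (fun v => d.insert b.1 v)))
      [(PySem.Dict.empty : PySem.Dict String String)]).map (fun d => d.items)

-- ===== PRECONDITION & SPEC =====
def Spec_build_variant_combinations_py (blocks : List (String × List String)) (out : List (List (String × String))) : Prop := out = build_variant_combinations_py_alt blocks
instance (blocks : List (String × List String)) (out : List (List (String × String))) : Decidable (Spec_build_variant_combinations_py blocks out) := by unfold Spec_build_variant_combinations_py; infer_instance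

-- ===== CLAIM (what is proved, stated in full; the proofs are below) =====
def Claim_equal_build_variant_combinations_py : Prop := ∀ (blocks : List (String × List String)), Dom_build_variant_combinations_py blocks → Spec_build_variant_combinations_py blocks (build_variant_combinations_py blocks)

-- ===== LEMMAS AND PROOFS =====

-- A's append-loop over the product is a map.
theorem pv_foldl_append_map {α β : Type} (l : List α) (g : α → β) (acc : List β) :
    l.foldl (fun xs x => xs ++ [g x]) acc = acc ++ l.map g := by
  induction l generalizing acc with
  | nil => simp
  | cons x xs ih => simp [List.foldl_cons, ih, List.append_assoc]

-- dict(pairs) is the left fold of insert over the pairs.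
theorem pv_ofList_eq_foldl (ps : List (String × String)) :
    PySem.Dict.ofList ps = ps.foldl (fun d p => d.insert p.1 p.2) PySem.Dict.empty := by
  rfl

-- Core invariant: B's fold over blocks, started from any accumulator of dicts,
-- equals extending each accumulator dict by every combo of the product.
theorem pv_fold_eq_product (blocks : List (String × List String))
    (acc : List (PySem.Dict String String)) :
    blocks.foldl
      (fun result b => result.flatMap (fun d => b.2.map (fun v => d.insert b.1 v)))
      acc
    = acc.flatMap (fun d =>
        (pvProduct (blocks.map (fun b => b.2))).map (fun combo =>
          ((blocks.map (fun b => b.1)).zip combo).foldl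
            (fun d p => d.insert p.1 p.2) d)) := by
  induction blocks generalizing acc with
  | nil => simp [pvProduct]
  | cons b bs ih =>
    simp only [List.foldl_cons, ih, List.map_cons, pvProduct]
    simp [List.flatMap_assoc, List.map_flatMap, List.flatMap_map, List.map_map,
      Function.comp_def, List.zip_cons_cons, List.foldl_cons]

theorem build_variant_combinations_eq (blocks : List (String × List String)) :
    build_variant_combinations_py blocks = build_variant_combinations_py_alt blocks := by
  unfold build_variant_combinations_py build_variant_combinations_py_alt
  by_cases h : blocks = []
  · simp [h]
  · simp only [if_neg h]
    rw [pv_fold_eq_product, pv_foldl_append_map]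
    simp [pv_ofList_eq_foldl, List.map_map, Function.comp]

-- ===== VERDICT (by name: the statement is the Claim_ definition above) =====
theorem build_variant_combinations_py_spec : Claim_equal_build_variant_combinations_py := by
  intro blocks _
  exact build_variant_combinations_eq blocks
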